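-- pv_equiv track=rewrite | github.com/kh277/BOJ | 백준/Silver/33278. 나무와 그림자 easy/나무와 그림자 easy.py | solve
-- ===== SOURCE A (Python) =====
-- def solve(N, t, tree):
--     tree.sort()
--     curTree = 0
--     result = 0
--     while curTree < N-1:
--         nextTree = curTree + 1
--
--         while nextTree < N:
--             shadow = tree[curTree][1] - t*(tree[nextTree][0]-tree[curTree][0])
--             if shadow > tree[nextTree][1]:
--                 result += tree[nextTree][1]
--                 nextTree += 1
--                 continue
--             result += shadow
--             break
--         curTree = nextTree
--
--     return result
-- ===== SOURCE B (Python) =====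
-- def solve(N, t, tree):
--     # Closed-form reformulation: the shadow cast onto tree i always comes from the
--     # earlier tree whose key h + t*x is maximal, so the answer is
--     # sum(min(h_i, prefixmax(keys)[i-1] - t*x_i)) -- three staged passes, no
--     # branch/state machine.  Sorts `tree` in place like A (return value is what matters).
--     tree.sort()
--     if N <= 1:
--         return 0
--     pts = tree[:N]
--     keys = [h + t * x for x, h in pts]
--     prefmax = []
--     m = keys[0]
--     for k in keys:
--         m = max(m, k)
--         prefmax.append(m)
--     return sum(min(h, m - t * x) for (x, h), m in zip(pts[1:], prefmax))
-- ===== Notes on version B (the rewrite author's own statement) =====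
-- stated objective: alternative
-- what changed: Replaces A's stateful source-tracking nested while-loops by a mathematical reformulation: the shadow source is always the prefix-argmax of the key h+t*x, so B computes the key list, a prefix-maximum list, and sums min(h_i, prefmax_{i-1} - t*x_i) over a zip -- staged passes with no branch/state machine.
import Mathlib
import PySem

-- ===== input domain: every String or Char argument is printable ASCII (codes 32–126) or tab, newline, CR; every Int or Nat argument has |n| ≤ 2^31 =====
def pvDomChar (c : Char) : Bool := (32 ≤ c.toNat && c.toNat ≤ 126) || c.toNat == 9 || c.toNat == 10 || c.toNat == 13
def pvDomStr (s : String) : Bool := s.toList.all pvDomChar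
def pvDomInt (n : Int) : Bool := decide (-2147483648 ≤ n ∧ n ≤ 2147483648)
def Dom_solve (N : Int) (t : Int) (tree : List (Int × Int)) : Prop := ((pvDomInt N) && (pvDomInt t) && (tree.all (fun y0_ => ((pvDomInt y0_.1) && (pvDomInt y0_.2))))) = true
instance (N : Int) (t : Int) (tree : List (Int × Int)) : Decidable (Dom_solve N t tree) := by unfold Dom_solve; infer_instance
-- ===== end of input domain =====

-- B replaces A's stateful nested while-loops by a reformulation: the shadow source is always
-- the prefix-argmax of the key h + t*x, so B sums min(h_i, prefixmax(keys)_{i-1} - t*x_i)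
-- via staged passes (key list, prefix-max list, zip-sum).  Same asymptotic cost.
-- Both A and B sort `tree` in place; the equivalence claimed is about the RETURN value.


-- ===== PORT A =====
-- inner while-loop of A: scans from `next`, accumulating capped shadows, until break or next = N;
-- returns (result, final nextTree).  fuel bounds the iteration count (never hit inside Pre_).
def solveInnerA (N t : Int) (s : List (Int × Int)) : Nat → Int → Int → Int → Int × Int
  | 0, _, next, result => (result, next)
  | fi + 1, cur, next, result =>
    if next < N then
      let shadow := (PySem.List.pyGetD s cur (0,0)).2 - t * ((PySem.List.pyGetD s next (0,0)).1 - (PySem.List.pyGetD s cur (0,0)).1)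
      if shadow > (PySem.List.pyGetD s next (0,0)).2 then
        solveInnerA N t s fi cur (next + 1) (result + (PySem.List.pyGetD s next (0,0)).2)
      else
        (result + shadow, next)
    else (result, next)

-- outer while-loop of A
def solveOuterA (N t : Int) (s : List (Int × Int)) : Nat → Int → Int → Int
  | 0, _, result => result
  | fo + 1, cur, result =>
    if cur < N - 1 then
      let p := solveInnerA N t s N.toNat cur (cur + 1) result
      solveOuterA N t s fo p.2 p.1
    else result

def solve (N : Int) (t : Int) (tree : List (Int × Int)) : Int :=
  let s := PySem.List.sorted2 tree Prod.fst Prod.snd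
  solveOuterA N t s N.toNat 0 0

-- ===== PORT B =====
-- staged passes of Source B: keys = [h + t*x], prefix-max list built by appending, zip-sum.
-- keys[0] is ported as pyGetD keys 0 0: exact whenever keys ≠ [] (guaranteed inside Pre_ when N ≥ 2).
def solve_alt (N : Int) (t : Int) (tree : List (Int × Int)) : Int :=
  let s := PySem.List.sorted2 tree Prod.fst Prod.snd
  if N ≤ 1 then 0
  else
    let pts := PySem.List.slice s none (some N)
    let keys := pts.map (fun p => p.2 + t * p.1)
    let prefmax := (keys.foldl (fun (st : List Int × Int) k =>
        let m := max st.2 k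
        (st.1 ++ [m], m)) (([] : List Int), PySem.List.pyGetD keys 0 0)).1
    ((pts.drop 1).zip prefmax).foldl (fun acc q => acc + min q.1.2 (q.2 - t * q.1.1)) 0

-- ===== PRECONDITION & SPEC =====
-- Pre_ excludes exactly the inputs where A raises IndexError: N ≥ 2 with fewer than N trees.
def Pre_solve (N : Int) (t : Int) (tree : List (Int × Int)) : Prop :=
  N ≤ (tree.length : Int) ∨ N ≤ 1
instance (N : Int) (t : Int) (tree : List (Int × Int)) : Decidable (Pre_solve N t tree) := by unfold Pre_solve; infer_instance

def pvWitness_solve : Int × Int × (List (Int × Int)) := (3, 2, [(0, 6), (1, 3), (4, 2)])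

def Spec_solve (N : Int) (t : Int) (tree : List (Int × Int)) (out : Int) : Prop := out = solve_alt N t tree
instance (N : Int) (t : Int) (tree : List (Int × Int)) (out : Int) : Decidable (Spec_solve N t tree out) := by unfold Spec_solve; infer_instance

-- ===== CLAIM (what is proved, stated in full; the proofs are below) =====
def Claim_equal_solve : Prop := ∀ (N : Int) (t : Int) (tree : List (Int × Int)), Dom_solve N t tree → Pre_solve N t tree → Spec_solve N t tree (solve N t tree)

-- ===== LEMMAS AND PROOFS =====

-- intermediate flat fold (proof-internal): A's nested loops collapse to one pass with the
-- shadow-source index as state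
def stepB (t : Int) (s : List (Int × Int)) (st : Int × Int) (i : Int) : Int × Int :=
  let shadow := (PySem.List.pyGetD s st.2 (0,0)).2 - t * ((PySem.List.pyGetD s i (0,0)).1 - (PySem.List.pyGetD s st.2 (0,0)).1)
  if shadow > (PySem.List.pyGetD s i (0,0)).2 then (st.1 + (PySem.List.pyGetD s i (0,0)).2, st.2)
  else (st.1 + shadow, i)

-- the key h + t*x of the element at (python) index c
def keyG (t : Int) (s : List (Int × Int)) (c : Int) : Int :=
  (PySem.List.pyGetD s c (0,0)).2 + t * (PySem.List.pyGetD s c (0,0)).1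

-- index-based spec: running max of keys, summing min(h_j, m - t*x_j)
def specIdx (t : Int) (s : List (Int × Int)) : List Int → Int → Int → Int
  | [], _, r => r
  | j :: l, m, r =>
      specIdx t s l (max m (keyG t s j))
        (r + min (PySem.List.pyGetD s j (0,0)).2 (m - t * (PySem.List.pyGetD s j (0,0)).1))

-- element-based spec: same, over the elements themselves
def specEl (t : Int) : List (Int × Int) → Int → Int → Int
  | [], _, r => r
  | p :: l, m, r => specEl t l (max m (p.2 + t * p.1)) (r + min p.2 (m - t * p.1))

-- prefix-max list (proof-internal image of Source B's append loop)
def pmAux : Int → List Int → List Int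
  | _, [] => []
  | m, k :: l => (max m k) :: pmAux (max m k) l

theorem innerA_stop (N t : Int) (s : List (Int × Int)) (fi : Nat) (cur next result : Int)
    (h : N ≤ next) : solveInnerA N t s fi cur next result = (result, next) := by
  cases fi with
  | zero => rfl
  | succ fi => simp only [solveInnerA]; rw [if_neg (by omega)]

theorem key (N t : Int) (s : List (Int × Int)) :
    ∀ (k : Nat) (cur next result : Int) (fi fo : Nat),
      0 ≤ cur → cur < next → (N - next).toNat ≤ k → (N - next).toNat ≤ fi →
      (N - 1 - next).toNat ≤ fo →
      solveOuterA N t s fo (solveInnerA N t s fi cur next result).2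
          (solveInnerA N t s fi cur next result).1
        = ((PySem.List.pyRange next N 1).foldl (stepB t s) (result, cur)).1 := by
  intro k
  induction k with
  | zero =>
    intro cur next result fi fo h0 hcn hk hfi hfo
    have hN : N ≤ next := by omega
    rw [innerA_stop N t s fi cur next result hN, PySem.List.pyRange_one_eq_nil hN]
    cases fo with
    | zero => rfl
    | succ fo => simp only [solveOuterA]; rw [if_neg (by omega)]; rfl
  | succ k ih =>
    intro cur next result fi fo h0 hcn hk hfi hfo
    by_cases hnext : next < N
    · obtain ⟨fi', rfl⟩ : ∃ fi', fi = fi' + 1 := by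
        cases fi with
        | zero => exfalso; omega
        | succ fi' => exact ⟨fi', rfl⟩
      rw [PySem.List.pyRange_one_cons hnext]
      simp only [solveInnerA, List.foldl_cons]
      rw [if_pos hnext]
      by_cases hs : (PySem.List.pyGetD s cur (0,0)).2 - t * ((PySem.List.pyGetD s next (0,0)).1 - (PySem.List.pyGetD s cur (0,0)).1) > (PySem.List.pyGetD s next (0,0)).2
      · rw [if_pos hs]
        have hstep : stepB t s (result, cur) next
            = (result + (PySem.List.pyGetD s next (0,0)).2, cur) := by
          simp only [stepB]; rw [if_pos hs]
        rw [hstep]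
        exact ih cur (next + 1) _ fi' fo h0 (by omega) (by omega) (by omega) (by omega)
      · rw [if_neg hs]
        have hstep : stepB t s (result, cur) next
            = (result + ((PySem.List.pyGetD s cur (0,0)).2 - t * ((PySem.List.pyGetD s next (0,0)).1 - (PySem.List.pyGetD s cur (0,0)).1)), next) := by
          simp only [stepB]; rw [if_neg hs]
        rw [hstep]
        set r := result + ((PySem.List.pyGetD s cur (0,0)).2 - t * ((PySem.List.pyGetD s next (0,0)).1 - (PySem.List.pyGetD s cur (0,0)).1)) with hr
        by_cases hlt : next < N - 1
        · obtain ⟨fo', rfl⟩ : ∃ fo', fo = fo' + 1 := by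
            cases fo with
            | zero => exfalso; omega
            | succ fo' => exact ⟨fo', rfl⟩
          simp only [solveOuterA]
          rw [if_pos hlt]
          exact ih next (next + 1) r N.toNat fo' (by omega) (by omega) (by omega) (by omega) (by omega)
        · have hN2 : N ≤ next + 1 := by omega
          rw [PySem.List.pyRange_one_eq_nil hN2]
          cases fo with
          | zero => rfl
          | succ fo => simp only [solveOuterA]; rw [if_neg hlt]; rfl
    · have hN : N ≤ next := by omega
      rw [innerA_stop N t s fi cur next result hN, PySem.List.pyRange_one_eq_nil hN]
      cases fo with
      | zero => rfl
      | succ fo => simp only [solveOuterA]; rw [if_neg (by omega)]; rfl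

theorem key2 (N t : Int) (s : List (Int × Int)) :
    ∀ (fo : Nat) (cur result : Int), 0 ≤ cur → (N - 1 - cur).toNat ≤ fo →
      solveOuterA N t s fo cur result
        = ((PySem.List.pyRange (cur + 1) N 1).foldl (stepB t s) (result, cur)).1 := by
  intro fo cur result h0 hfo
  cases fo with
  | zero =>
    rw [PySem.List.pyRange_one_eq_nil (by omega)]; rfl
  | succ fo' =>
    by_cases hlt : cur < N - 1
    · simp only [solveOuterA]
      rw [if_pos hlt]
      exact key N t s (N - (cur + 1)).toNat cur (cur + 1) result N.toNat fo' h0 (by omega) le_rfl (by omega) (by omega)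
    · simp only [solveOuterA]
      rw [if_neg hlt, PySem.List.pyRange_one_eq_nil (by omega)]; rfl

-- the flat fold computes specIdx with the running max carried as the source's key
theorem key3 (t : Int) (s : List (Int × Int)) :
    ∀ (l : List Int) (r c : Int),
      (l.foldl (stepB t s) (r, c)).1 = specIdx t s l (keyG t s c) r := by
  intro l
  induction l with
  | nil => intro r c; rfl
  | cons j l ih =>
    intro r c
    simp only [List.foldl_cons, specIdx]
    have hexp : t * ((PySem.List.pyGetD s j (0,0)).1 - (PySem.List.pyGetD s c (0,0)).1)
        = t * (PySem.List.pyGetD s j (0,0)).1 - t * (PySem.List.pyGetD s c (0,0)).1 := by ring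
    by_cases hs : (PySem.List.pyGetD s c (0,0)).2 - t * ((PySem.List.pyGetD s j (0,0)).1 - (PySem.List.pyGetD s c (0,0)).1) > (PySem.List.pyGetD s j (0,0)).2
    · have hs' := hs
      rw [hexp] at hs'
      have hstep : stepB t s (r, c) j = (r + (PySem.List.pyGetD s j (0,0)).2, c) := by
        simp only [stepB]; rw [if_pos hs]
      rw [hstep, ih]
      have hmax : max (keyG t s c) (keyG t s j) = keyG t s c := by
        simp only [keyG]; omega
      have hmin : min (PySem.List.pyGetD s j (0,0)).2 (keyG t s c - t * (PySem.List.pyGetD s j (0,0)).1)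
          = (PySem.List.pyGetD s j (0,0)).2 := by
        simp only [keyG]; omega
      rw [hmax, hmin]
    · have hs' := hs
      rw [hexp] at hs'
      have hstep : stepB t s (r, c) j
          = (r + ((PySem.List.pyGetD s c (0,0)).2 - t * ((PySem.List.pyGetD s j (0,0)).1 - (PySem.List.pyGetD s c (0,0)).1)), j) := by
        simp only [stepB]; rw [if_neg hs]
      rw [hstep, ih]
      have hmax : max (keyG t s c) (keyG t s j) = keyG t s j := by
        simp only [keyG]; omega
      have hval : r + ((PySem.List.pyGetD s c (0,0)).2 - t * ((PySem.List.pyGetD s j (0,0)).1 - (PySem.List.pyGetD s c (0,0)).1))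
          = r + min (PySem.List.pyGetD s j (0,0)).2 (keyG t s c - t * (PySem.List.pyGetD s j (0,0)).1) := by
        simp only [keyG]; rw [hexp]; omega
      rw [hmax, hval]

-- index-based spec over a range equals the element-based spec over the slice of s
theorem key4 (t N : Int) (s : List (Int × Int)) (hlen : N ≤ (s.length : Int)) :
    ∀ (k : Nat) (i m r : Int), 0 ≤ i → (N - i).toNat ≤ k →
      specIdx t s (PySem.List.pyRange i N 1) m r
        = specEl t ((s.take N.toNat).drop i.toNat) m r := by
  intro k
  induction k with
  | zero =>
    intro i m r h0 hk
    have hN : N ≤ i := by omega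
    rw [PySem.List.pyRange_one_eq_nil hN]
    have hnil : (s.take N.toNat).drop i.toNat = [] := by
      apply List.drop_eq_nil_of_le
      have h1 : N.toNat ≤ i.toNat := Int.toNat_le_toNat hN
      simp only [List.length_take]
      omega
    rw [hnil]
    rfl
  | succ k ih =>
    intro i m r h0 hk
    by_cases hiN : i < N
    · have hilen : i.toNat < s.length := by omega
      have hgd : PySem.List.pyGetD s i (0,0) = s[i.toNat] :=
        PySem.List.pyGetD_eq_getElem s (0,0) h0 (by omega)
      have hdrop : (s.take N.toNat).drop i.toNat
          = s[i.toNat] :: (s.take N.toNat).drop (i.toNat + 1) := by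
        have hi' : i.toNat < (s.take N.toNat).length := by
          simp only [List.length_take]; omega
        rw [List.drop_eq_getElem_cons hi']
        congr 1
        exact List.getElem_take
      rw [PySem.List.pyRange_one_cons hiN, hdrop]
      simp only [specIdx, specEl, keyG, hgd]
      have h1 : (i + 1).toNat = i.toNat + 1 := by omega
      rw [← h1]
      exact ih (i + 1) _ _ (by omega) (by omega)
    · have hN : N ≤ i := by omega
      rw [PySem.List.pyRange_one_eq_nil hN]
      have hnil : (s.take N.toNat).drop i.toNat = [] := by
        apply List.drop_eq_nil_of_le
        have h1 : N.toNat ≤ i.toNat := Int.toNat_le_toNat hN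
        simp only [List.length_take]
        omega
      rw [hnil]
      rfl

-- Source B's append loop builds pmAux (accumulator lemma)
theorem key5 (keys : List Int) : ∀ (acc : List Int) (m : Int),
    (keys.foldl (fun (st : List Int × Int) k => (st.1 ++ [max st.2 k], max st.2 k)) (acc, m)).1
      = acc ++ pmAux m keys := by
  induction keys with
  | nil => intro acc m; simp [pmAux]
  | cons k keys ih =>
    intro acc m
    simp only [List.foldl_cons, pmAux]
    rw [ih]
    simp

-- the zip-sum over (elements, prefix maxes) equals the element-based spec
theorem key6 (t : Int) : ∀ (rest : List (Int × Int)) (m r : Int),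
    ((rest.zip (m :: pmAux m (rest.map (fun p => p.2 + t * p.1)))).foldl
        (fun acc q => acc + min q.1.2 (q.2 - t * q.1.1)) r)
      = specEl t rest m r := by
  intro rest
  induction rest with
  | nil => intro m r; rfl
  | cons p rest ih =>
    intro m r
    simp only [List.map_cons, pmAux, List.zip_cons_cons, List.foldl_cons, specEl]
    exact ih (max m (p.2 + t * p.1)) (r + min p.2 (m - t * p.1))

-- ===== VERDICT (by name: the statement is the Claim_ definition above) =====
theorem solve_spec : Claim_equal_solve := by
  intro N t tree _ hpre
  unfold Spec_solve solve solve_alt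
  set s := PySem.List.sorted2 tree Prod.fst Prod.snd with hs
  have hflat := key2 N t s N.toNat 0 0 le_rfl (by omega)
  by_cases hN1 : N ≤ 1
  · rw [if_pos hN1]
    rw [hflat, zero_add, PySem.List.pyRange_one_eq_nil (by omega)]
    rfl
  · rw [if_neg hN1]
    have hlen : N ≤ (s.length : Int) := by
      have hperm : s.Perm tree := PySem.List.sorted2_perm tree Prod.fst Prod.snd false
      have := hperm.length_eq
      rcases hpre with h | h
      · omega
      · omega
    obtain ⟨a, srest, hcons⟩ : ∃ a srest, s = a :: srest := by
      cases hsc : s with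
      | nil => exfalso; rw [hsc] at hlen; simp at hlen; omega
      | cons a srest => exact ⟨a, srest, rfl⟩
    obtain ⟨m, hm⟩ : ∃ m, N.toNat = m + 1 := ⟨N.toNat - 1, by omega⟩
    have hpts : s.take N.toNat = a :: List.take m srest := by
      rw [hcons, hm, List.take_succ_cons]
    have hget0 : PySem.List.pyGetD s (0 : Int) (0,0) = a := by
      rw [hcons]; simp [PySem.List.pyGetD, PySem.List.pyGet?, PySem.List.pyIdx?]
    have hkeyG : keyG t s 0 = a.2 + t * a.1 := by
      simp only [keyG, hget0]
    -- A's side down to specEl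
    have hA : solveOuterA N t s N.toNat 0 0
        = specEl t (List.take m srest) (a.2 + t * a.1) 0 := by
      rw [hflat, zero_add, key3, key4 t N s hlen (N - 1).toNat 1 _ _ (by omega) (by omega),
        hkeyG]
      norm_num [hpts]
    rw [hA]
    -- B's side down to specEl
    have hNnat : ((N.toNat : Nat) : Int) = N := by omega
    have hslice : PySem.List.slice s none (some N) = s.take N.toNat := by
      rw [← hNnat]
      exact PySem.List.slice_to_natCast s N.toNat
    rw [hslice, hpts]
    simp only [List.map_cons, List.drop_succ_cons, List.drop_zero]
    have hget0k : PySem.List.pyGetD ((a.2 + t * a.1) :: (List.take m srest).map (fun p => p.2 + t * p.1)) (0 : Int) 0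
        = a.2 + t * a.1 := by
      simp [PySem.List.pyGetD, PySem.List.pyGet?, PySem.List.pyIdx?]
    rw [hget0k, key5]
    simp only [List.nil_append, pmAux, max_self]
    rw [key6]
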